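-- pv_equiv track=rewrite | github.com/nischikata/AggressivenessClassification | Utils/text_mods.py | handle_exclamationMark
-- ===== SOURCE A (Python) =====
-- from string import punctuation
--
-- def handle_exclamationMark(token):
--     """
--     replaces the '!' char with an 'i' if its within a word
--     :param token: string
--     :return: string
--
--     >>> t = "Stop!!?!"
--     >>> handle_exclamationMark(t)
--     'Stop!!?!'
--     >>>
--     >>> t = "$!X"
--     >>> handle_exclamationMark(t)
--     '$iX'
--     >>> handle_exclamationMark("Sh!t!!!")
--     'Shit!!!'
--     >>> handle_exclamationMark("tr!99er")
--     'tri99er'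
--     """
--     if '!' in token:
--         punc = True
--         index = len(token) - 1
--         new_token = ""
--         while index >= 0:
--             char = token[index]
--             index -= 1
--
--             if punc and char not in punctuation:
--                 punc = False
--
--             if char == '!' and not punc:
--                 char = 'i'
--
--             new_token = char + new_token
--
--         return new_token
--
--     else:
--         return token
-- ===== SOURCE B (Python) =====
-- from string import punctuation
--
-- def handle_exclamationMark(token):
--     stripped = token.rstrip(punctuation)
--     k = len(stripped)
--     return ''.join('i' if c == '!' else c for c in token[:k]) + token[k:]
-- ===== Notes on version B (the rewrite author's own statement) =====
-- stated objective: simpler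
-- what changed: Replaced the right-to-left stateful while-loop with a punc flag by computing the trailing-punctuation boundary via token.rstrip(punctuation) and doing a bulk exclamation-to-letter substitution on the prefix region only.
import Mathlib
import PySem

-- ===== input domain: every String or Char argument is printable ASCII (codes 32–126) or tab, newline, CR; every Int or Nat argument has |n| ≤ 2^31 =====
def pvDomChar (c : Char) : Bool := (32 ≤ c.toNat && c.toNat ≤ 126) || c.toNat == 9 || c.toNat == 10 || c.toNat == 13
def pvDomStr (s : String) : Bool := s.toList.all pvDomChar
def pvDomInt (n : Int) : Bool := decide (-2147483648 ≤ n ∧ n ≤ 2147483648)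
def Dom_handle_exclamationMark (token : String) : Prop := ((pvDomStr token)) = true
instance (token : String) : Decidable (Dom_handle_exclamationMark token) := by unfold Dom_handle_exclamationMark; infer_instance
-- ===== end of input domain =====

-- B replaces A's right-to-left while-loop with a punc flag by an rstrip(punctuation) boundary
-- computation plus a bulk '!'→'i' substitution on the prefix region (objective: simpler).

-- string.punctuation
def pvPunct : List Char := "!\"#$%&'()*+,-./:;<=>?@[\\]^_`{|}~".toList

-- ===== PORT A =====
-- the while loop: index counts down; state (punc, new_token); `token[index]` is always in
-- range here (index starts at len-1), so getD is exact; `char not in punctuation` on a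
-- single char is list membership in pvPunct (exact)
def pvALoop (s : List Char) : Nat → Bool → List Char → List Char
  | 0, _, acc => acc
  | n+1, punc, acc =>
      let char := s.getD n ' '
      let punc' := if punc && !(char ∈ pvPunct : Bool) then false else punc
      let char' := if char == '!' && !punc' then 'i' else char
      pvALoop s n punc' (char' :: acc)

def handle_exclamationMark (token : String) : String :=
  if PySem.Str.isIn "!" token then
    String.ofList (pvALoop token.toList token.toList.length true [])
  else token

-- ===== PORT B =====
-- token.rstrip(punctuation) is ported by hand: drop the trailing run of punctuation chars
-- (exact on ASCII); the join-generator is the map, token[:k]/token[k:] are PySem slices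
def handle_exclamationMark_alt (token : String) : String :=
  let cs := token.toList
  let stripped := (cs.reverse.dropWhile (· ∈ pvPunct)).reverse
  let k : Int := stripped.length
  String.ofList ((PySem.List.slice cs none (some k)).map (fun c => if c == '!' then 'i' else c)
             ++ PySem.List.slice cs (some k) none)

-- ===== PRECONDITION & SPEC =====
def Spec_handle_exclamationMark (token : String) (out : String) : Prop := out = handle_exclamationMark_alt token
instance (token : String) (out : String) : Decidable (Spec_handle_exclamationMark token out) := by unfold Spec_handle_exclamationMark; infer_instance

-- ===== CLAIM (what is proved, stated in full; the proofs are below) =====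
def Claim_equal_handle_exclamationMark : Prop := ∀ (token : String), Dom_handle_exclamationMark token → Spec_handle_exclamationMark token (handle_exclamationMark token)

-- ===== LEMMAS AND PROOFS =====

theorem pvALoop_false (s : List Char) : ∀ n, n ≤ s.length → ∀ acc,
    pvALoop s n false acc = (s.take n).map (fun c => if c == '!' then 'i' else c) ++ acc := by
  intro n
  induction n with
  | zero => intro _ acc; simp [pvALoop]
  | succ n ih =>
      intro h acc
      have hn : n < s.length := by omega
      rw [pvALoop]
      simp only [Bool.false_and, Bool.false_eq_true, if_false, Bool.not_false, Bool.and_true]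
      rw [ih (by omega), List.getD_eq_getElem s ' ' hn]
      have htake : s.take (n+1) = s.take n ++ [s[n]] := by
        rw [List.take_add_one, List.getElem?_eq_getElem hn]; rfl
      rw [htake]
      simp only [List.map_append, List.map_cons, List.map_nil, List.append_assoc,
        List.singleton_append]

theorem pvALoop_true (s : List Char) : ∀ n, n ≤ s.length → ∀ acc,
    pvALoop s n true acc =
      (((s.take n).reverse.dropWhile (· ∈ pvPunct)).reverse.map (fun c => if c == '!' then 'i' else c)
        ++ ((s.take n).reverse.takeWhile (· ∈ pvPunct)).reverse) ++ acc := by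
  intro n
  induction n with
  | zero => intro _ acc; simp [pvALoop]
  | succ n ih =>
      intro h acc
      have hn : n < s.length := by omega
      have htake : s.take (n+1) = s.take n ++ [s[n]] := by
        rw [List.take_add_one, List.getElem?_eq_getElem hn]; rfl
      rw [pvALoop, List.getD_eq_getElem s ' ' hn]
      by_cases hp : s[n] ∈ pvPunct
      · -- trailing punctuation continues: char stays, punc stays true
        simp only [hp, decide_true, Bool.not_true, Bool.and_false, Bool.false_eq_true, if_false]
        rw [ih (by omega), htake]
        have hd : List.dropWhile (fun x => decide (x ∈ pvPunct)) (s[n] :: (s.take n).reverse)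
            = List.dropWhile (fun x => decide (x ∈ pvPunct)) (s.take n).reverse := by simp [hp]
        have ht : List.takeWhile (fun x => decide (x ∈ pvPunct)) (s[n] :: (s.take n).reverse)
            = s[n] :: List.takeWhile (fun x => decide (x ∈ pvPunct)) (s.take n).reverse := by
          simp [hp]
        simp only [List.reverse_append, List.reverse_cons, List.reverse_nil, List.nil_append,
          List.singleton_append, hd, ht, List.append_assoc]
      · -- first non-punctuation char from the right: punc becomes false
        have hne : (s[n] == '!') = false := by
          cases hq : (s[n] == '!')
          · rfl
          · exfalso; apply hp; have := (beq_iff_eq).mp hq; rw [this]; decide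
        simp only [hp, decide_false, Bool.not_false, Bool.and_true, if_true, hne,
          Bool.false_eq_true, if_false]
        rw [pvALoop_false s n (by omega), htake]
        have hne' : s[n] ≠ '!' := by intro e; exact hp (by rw [e]; decide)
        have hd : List.dropWhile (fun x => decide (x ∈ pvPunct)) (s[n] :: (s.take n).reverse)
            = s[n] :: (s.take n).reverse := by simp [hp]
        have ht : List.takeWhile (fun x => decide (x ∈ pvPunct)) (s[n] :: (s.take n).reverse)
            = [] := by simp [hp]
        simp only [List.reverse_append, List.reverse_cons, List.reverse_nil, List.nil_append,
          List.singleton_append, hd, ht, List.reverse_reverse, List.map_append, List.map_cons,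
          List.map_nil, hne, Bool.false_eq_true, if_false, List.append_assoc]

-- B's value written with take/drop at the boundary
theorem alt_eq (token : String) :
    handle_exclamationMark_alt token =
      String.ofList
        ((((token.toList.reverse.dropWhile (· ∈ pvPunct)).reverse).map
            (fun c => if c == '!' then 'i' else c))
          ++ (token.toList.reverse.takeWhile (· ∈ pvPunct)).reverse) := by
  simp only [handle_exclamationMark_alt]
  rw [PySem.List.slice_to_natCast, PySem.List.slice_from_natCast]
  generalize hpre : (token.toList.reverse.dropWhile (· ∈ pvPunct)).reverse = pre
  generalize hsuf : (token.toList.reverse.takeWhile (· ∈ pvPunct)).reverse = suf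
  have hsplit : token.toList = pre ++ suf := by
    rw [← hpre, ← hsuf]
    conv_lhs => rw [← List.reverse_reverse token.toList,
      ← List.takeWhile_append_dropWhile (p := (· ∈ pvPunct)) (l := token.toList.reverse)]
    rw [List.reverse_append]
  rw [hsplit, List.take_left, List.drop_left]

theorem map_id_of_no_bang (l : List Char) (h : '!' ∉ l) :
    l.map (fun c => if c == '!' then 'i' else c) = l := by
  induction l with
  | nil => rfl
  | cons c t ih =>
      have hc : c ≠ '!' := fun e => h (by simp [e])
      simp only [List.map_cons, ih (fun m => h (List.mem_cons_of_mem _ m))]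
      simp [hc]

-- ===== VERDICT (by name: the statement is the Claim_ definition above) =====
theorem handle_exclamationMark_spec : Claim_equal_handle_exclamationMark := by
  intro token _
  unfold Spec_handle_exclamationMark
  unfold handle_exclamationMark
  rw [alt_eq]
  by_cases hin : PySem.Str.isIn "!" token
  · rw [if_pos hin]
    rw [pvALoop_true token.toList token.toList.length (le_refl _)]
    rw [List.take_length, List.append_nil]
  · rw [if_neg hin]
    have hmem : '!' ∉ token.toList := by
      intro hm
      apply hin
      rw [PySem.Str.isIn_iff_infix]
      obtain ⟨l₁, l₂, hl⟩ := List.append_of_mem hm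
      exact ⟨l₁, l₂, by simp [hl]⟩
    have hpre : '!' ∉ (token.toList.reverse.dropWhile (· ∈ pvPunct)).reverse := by
      intro hm
      exact hmem (by
        have := List.mem_reverse.mp (List.dropWhile_sublist (p := (· ∈ pvPunct))
          (l := token.toList.reverse) |>.mem (List.mem_reverse.mp hm))
        exact this)
    rw [map_id_of_no_bang _ hpre]
    conv_lhs => rw [← String.ofList_toList (s := token)]
    congr 1
    conv_lhs => rw [← List.reverse_reverse token.toList,
      ← List.takeWhile_append_dropWhile (p := (· ∈ pvPunct)) (l := token.toList.reverse)]
    rw [List.reverse_append]
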